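-- pv_equiv track=rewrite | github.com/hunter-classes/fall-2022-127-work-tkhandaker357 | chapter-10/listlab.py | sumToEven
-- ===== SOURCE A (Python) =====
-- def sumToEven(list):
--     evenNumberIndex = 0
--     sum = 0
--     for index in range(len(list)):
--         if list[index] % 2 == 0:
--             evenNumberIndex = index
--     for index in range(evenNumberIndex):
--         sum += list[index]
--     return sum
-- ===== SOURCE B (Python) =====
-- def sumToEven(list):
--     total = 0
--     best = 0
--     for x in list:
--         if x % 2 == 0:
--             best = total
--         total += x
--     return best
-- ===== Notes on version B (the rewrite author's own statement) =====
-- stated objective: alternative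
-- what changed: Replaces A's two index loops (find last even index, then re-scan to sum the prefix) by one pass over the elements that carries a running prefix sum and records it at each even element.
import Mathlib
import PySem

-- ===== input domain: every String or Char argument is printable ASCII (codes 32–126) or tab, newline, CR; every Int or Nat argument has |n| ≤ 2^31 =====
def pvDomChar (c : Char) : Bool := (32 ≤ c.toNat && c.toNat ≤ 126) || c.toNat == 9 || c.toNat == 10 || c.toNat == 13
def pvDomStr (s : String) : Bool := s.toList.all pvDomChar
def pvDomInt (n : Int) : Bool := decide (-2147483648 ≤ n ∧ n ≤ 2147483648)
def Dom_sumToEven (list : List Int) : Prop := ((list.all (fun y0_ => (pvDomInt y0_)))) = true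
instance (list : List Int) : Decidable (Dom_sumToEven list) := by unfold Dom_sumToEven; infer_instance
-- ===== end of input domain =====

-- B replaces A's two index loops by a single pass keeping a running prefix sum (alternative decomposition, same cost).

-- ===== PORT A =====
def sumToEven (list : List Int) : Int :=
  let evenNumberIndex : Int :=
    (PySem.List.pyRange 0 list.length 1).foldl
      (fun e index => if PySem.Int.mod (PySem.List.pyGetD list index 0) 2 == 0 then index else e) 0
  (PySem.List.pyRange 0 evenNumberIndex 1).foldl
    (fun sum index => sum + PySem.List.pyGetD list index 0) 0

-- ===== PORT B =====
-- p = (total, best); at an even element best becomes the prefix sum before it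
def sumToEvenStep (p : Int × Int) (x : Int) : Int × Int :=
  (p.1 + x, if PySem.Int.mod x 2 == 0 then p.1 else p.2)

def sumToEven_alt (list : List Int) : Int :=
  (list.foldl sumToEvenStep (0, 0)).2

-- ===== PRECONDITION & SPEC =====
def Spec_sumToEven (list : List Int) (out : Int) : Prop := out = sumToEven_alt list
instance (list : List Int) (out : Int) : Decidable (Spec_sumToEven list out) := by unfold Spec_sumToEven; infer_instance

-- ===== CLAIM (what is proved, stated in full; the proofs are below) =====
def Claim_equal_sumToEven : Prop := ∀ (list : List Int), Dom_sumToEven list → Spec_sumToEven list (sumToEven list)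

-- ===== LEMMAS AND PROOFS =====

-- A's first loop, as a named function
def aIdx (l : List Int) : Int :=
  (PySem.List.pyRange 0 l.length 1).foldl
    (fun e index => if PySem.Int.mod (PySem.List.pyGetD l index 0) 2 == 0 then index else e) 0

theorem sumToEven_eq_aIdx (l : List Int) :
    sumToEven l =
      (PySem.List.pyRange 0 (aIdx l) 1).foldl
        (fun sum index => sum + PySem.List.pyGetD l index 0) 0 := rfl

-- a last-match fold stays equal to its init or lands in the list
theorem foldl_if_mem {c : Int → Bool} (r : List Int) (e0 : Int) :
    r.foldl (fun e i => if c i then i else e) e0 = e0 ∨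
    r.foldl (fun e i => if c i then i else e) e0 ∈ r := by
  induction r generalizing e0 with
  | nil => exact Or.inl rfl
  | cons a t ih =>
    simp only [List.foldl_cons]
    rcases ih (if c a then a else e0) with h | h
    · rw [h]; by_cases hc : c a
      · simp [hc]
      · simp [hc]
    · exact Or.inr (List.mem_cons_of_mem _ h)

theorem aIdx_bounds (l : List Int) : 0 ≤ aIdx l ∧ aIdx l ≤ l.length := by
  unfold aIdx
  rcases foldl_if_mem (c := fun i => PySem.Int.mod (PySem.List.pyGetD l i 0) 2 == 0)
      (PySem.List.pyRange 0 l.length 1) 0 with h | h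
  · rw [h]; exact ⟨le_refl 0, Int.natCast_nonneg _⟩
  · rw [PySem.List.mem_pyRange_one] at h
    exact ⟨h.1, le_of_lt h.2⟩

-- A's second loop sums the prefix of length k
theorem sum_loop_eq_take (l : List Int) (k : Int) (h0 : 0 ≤ k) (hk : k ≤ l.length) :
    (PySem.List.pyRange 0 k 1).foldl (fun sum index => sum + PySem.List.pyGetD l index 0) 0
      = (l.take k.toNat).sum := by
  have hlen : ((l.take k.toNat).length : Int) = k := by
    simp [List.length_take]
    omega
  have hcongr :
      (PySem.List.pyRange 0 k 1).foldl (fun sum index => sum + PySem.List.pyGetD l index 0) 0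
        = (PySem.List.pyRange 0 k 1).foldl
            (fun sum index => sum + PySem.List.pyGetD (l.take k.toNat) index 0) 0 := by
    apply PySem.List.foldl_congr_mem
    intro a x hx
    rw [PySem.List.mem_pyRange_one] at hx
    have hx2 : x < ((l.take k.toNat).length : Int) := by omega
    rw [PySem.List.pyGetD_eq_getElem l (i := x) 0 hx.1 (by omega),
        PySem.List.pyGetD_eq_getElem (l.take k.toNat) (i := x) 0 hx.1 hx2]
    rw [List.getElem_take]
  rw [hcongr]
  generalize hm : l.take k.toNat = m at hlen ⊢
  rw [← hlen, PySem.List.foldl_pyRange_zero_pyGetD']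
  exact List.sum_eq_foldl.symm

theorem sumToEven_eq_take (l : List Int) :
    sumToEven l = (l.take (aIdx l).toNat).sum := by
  rw [sumToEven_eq_aIdx, sum_loop_eq_take l (aIdx l) (aIdx_bounds l).1 (aIdx_bounds l).2]

-- aIdx over a snoc
theorem aIdx_append (l : List Int) (x : Int) :
    aIdx (l ++ [x]) = if PySem.Int.mod x 2 == 0 then (l.length : Int) else aIdx l := by
  unfold aIdx
  have hr : PySem.List.pyRange 0 ((l ++ [x]).length) 1
      = PySem.List.pyRange 0 (l.length) 1 ++ [(l.length : Int)] := by
    have : ((l ++ [x]).length : Int) = (l.length : Int) + 1 := by simp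
    rw [this, PySem.List.pyRange_one_succ_right (by exact_mod_cast Int.natCast_nonneg l.length)]
  rw [hr, List.foldl_append]
  have hcongr :
      (PySem.List.pyRange 0 (l.length) 1).foldl
          (fun e index => if PySem.Int.mod (PySem.List.pyGetD (l ++ [x]) index 0) 2 == 0 then index else e) 0
        = (PySem.List.pyRange 0 (l.length) 1).foldl
          (fun e index => if PySem.Int.mod (PySem.List.pyGetD l index 0) 2 == 0 then index else e) 0 := by
    apply PySem.List.foldl_congr_mem
    intro a i hi
    rw [PySem.List.mem_pyRange_one] at hi
    have hi2 : i.toNat < l.length := by omega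
    rw [PySem.List.pyGetD_eq_getElem (l ++ [x]) (i := i) 0 hi.1 (by simp; omega),
        PySem.List.pyGetD_eq_getElem l (i := i) 0 hi.1 (by exact_mod_cast hi.2)]
    rw [List.getElem_append_left]
  rw [hcongr]
  simp only [List.foldl_cons, List.foldl_nil]
  have hget : PySem.List.pyGetD (l ++ [x]) (l.length : Int) 0 = x := by
    rw [PySem.List.pyGetD_eq_getElem (l ++ [x]) (i := (l.length : Int)) 0 (Int.natCast_nonneg _) (by simp)]
    simp
  rw [hget]

-- B's running total is the sum so far
theorem step_fst (l : List Int) (t b : Int) :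
    (l.foldl sumToEvenStep (t, b)).1 = t + l.sum := by
  induction l generalizing t b with
  | nil => simp
  | cons a s ih =>
    simp only [List.foldl_cons, List.sum_cons, sumToEvenStep]
    rw [ih]; ring

theorem main_eq (l : List Int) : sumToEven l = sumToEven_alt l := by
  induction l using List.reverseRecOn with
  | nil => rfl
  | append_singleton s x ih =>
    rw [sumToEven_eq_take, aIdx_append]
    unfold sumToEven_alt
    rw [List.foldl_append]
    simp only [List.foldl_cons, List.foldl_nil, sumToEvenStep]
    by_cases hx : PySem.Int.mod x 2 == 0
    · simp only [hx, if_pos]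
      rw [step_fst s 0 0, zero_add, Int.toNat_natCast, List.take_left]
    · simp only [hx, if_neg, Bool.false_eq_true, not_false_iff]
      rw [List.take_append_of_le_length (by have := (aIdx_bounds s).2; omega)]
      rw [← sumToEven_eq_take s, ih]
      rfl

-- ===== VERDICT (by name: the statement is the Claim_ definition above) =====
theorem sumToEven_spec : Claim_equal_sumToEven := by
  intro l _
  unfold Spec_sumToEven
  exact main_eq l
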